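-- pv_equiv track=rewrite | github.com/MeridianAlgo/Cryptvault | cryptvault/cli/validators.py | _find_similar_tickers
-- ===== SOURCE A (Python) =====
-- from typing import List, Dict, Tuple, Optional
--
-- def _find_similar_tickers(ticker: str, supported_tickers: List[str], max_suggestions: int = 5) -> List[str]:
--     """
--     Find similar ticker symbols using simple string matching.
--
--     Args:
--         ticker: Ticker to find matches for
--         supported_tickers: List of supported tickers
--         max_suggestions: Maximum number of suggestions to return
--
--     Returns:
--         List of similar ticker symbols
--     """
--     suggestions = []
--     ticker_lower = ticker.lower()
--
--     # Exact prefix matches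
--     for supported in supported_tickers:
--         if supported.lower().startswith(ticker_lower):
--             suggestions.append(supported)
--
--     # Contains matches
--     if len(suggestions) < max_suggestions:
--         for supported in supported_tickers:
--             if ticker_lower in supported.lower() and supported not in suggestions:
--                 suggestions.append(supported)
--
--     return suggestions[:max_suggestions]
-- ===== SOURCE B (Python) =====
-- def _find_similar_tickers(ticker, supported_tickers, max_suggestions=5):
--     """One classifying pass: prefix bucket (dups kept) + deduped contains-only bucket."""
--     ticker_lower = ticker.lower()
--     prefix = []
--     contains_only = []
--     for s in supported_tickers:
--         sl = s.lower()
--         if sl.startswith(ticker_lower):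
--             prefix.append(s)
--         elif ticker_lower in sl and s not in contains_only:
--             contains_only.append(s)
--     return (prefix + contains_only)[:max_suggestions]
-- ===== Notes on version B (the rewrite author's own statement) =====
-- stated objective: alternative
-- what changed: Replaces A's two sequential full scans with a guard testing membership in the whole growing suggestions list by one classifying pass into a prefix bucket and a deduped contains-only bucket, concatenated then truncated.
-- outside the precondition, e.g. on _find_similar_tickers('a', ['ba', 'ca', 'da'], -1): A returns [], B returns ['ba', 'ca']
import Mathlib
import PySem

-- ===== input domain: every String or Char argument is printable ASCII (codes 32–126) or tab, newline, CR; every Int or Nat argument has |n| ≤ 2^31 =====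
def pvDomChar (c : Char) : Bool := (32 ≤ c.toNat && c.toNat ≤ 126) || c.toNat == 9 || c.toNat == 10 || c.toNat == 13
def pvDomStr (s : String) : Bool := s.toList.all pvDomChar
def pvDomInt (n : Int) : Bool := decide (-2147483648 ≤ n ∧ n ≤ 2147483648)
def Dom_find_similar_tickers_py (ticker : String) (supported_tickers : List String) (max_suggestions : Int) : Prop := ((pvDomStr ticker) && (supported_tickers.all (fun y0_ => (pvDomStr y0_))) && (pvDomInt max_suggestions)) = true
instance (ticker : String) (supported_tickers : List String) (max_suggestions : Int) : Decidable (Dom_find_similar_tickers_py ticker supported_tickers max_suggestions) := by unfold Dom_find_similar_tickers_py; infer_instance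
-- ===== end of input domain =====

-- B replaces A's two sequential full scans (second pass guarded by membership in the whole growing
-- suggestions list) with one classifying pass into a prefix bucket and a deduped contains-only bucket
-- (objective: alternative decomposition).

-- ===== PORT A =====
def find_similar_tickers_py (ticker : String) (supported_tickers : List String) (max_suggestions : Int) : List String :=
  let ticker_lower := PySem.Str.lower ticker
  -- Exact prefix matches
  let suggestions := supported_tickers.foldl
    (fun acc supported =>
      if PySem.Str.startswith (PySem.Str.lower supported) ticker_lower then acc ++ [supported] else acc) []
  -- Contains matches
  let suggestions :=
    if (suggestions.length : Int) < max_suggestions then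
      supported_tickers.foldl
        (fun acc supported =>
          if PySem.Str.isIn ticker_lower (PySem.Str.lower supported) && !(acc.contains supported)
          then acc ++ [supported] else acc) suggestions
    else suggestions
  PySem.List.slice suggestions none (some max_suggestions)

-- ===== PORT B =====
def find_similar_tickers_py_alt (ticker : String) (supported_tickers : List String) (max_suggestions : Int) : List String :=
  let ticker_lower := PySem.Str.lower ticker
  let buckets := supported_tickers.foldl
    (fun (pc : List String × List String) s =>
      let sl := PySem.Str.lower s
      if PySem.Str.startswith sl ticker_lower then (pc.1 ++ [s], pc.2)
      else if PySem.Str.isIn ticker_lower sl && !(pc.2.contains s) then (pc.1, pc.2 ++ [s])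
      else pc) ([], [])
  PySem.List.slice (buckets.1 ++ buckets.2) none (some max_suggestions)

-- ===== PRECONDITION & SPEC =====
-- Pre_ restricts to the natural domain of a count: it excludes negative max_suggestions (on which A still
-- returns a value), where A's skipped second pass combined with Python's negative-slice semantics is an
-- implementation artefact that B's bucket concatenation does not reproduce.
def Pre_find_similar_tickers_py (ticker : String) (supported_tickers : List String) (max_suggestions : Int) : Prop :=
  0 ≤ max_suggestions
instance (ticker : String) (supported_tickers : List String) (max_suggestions : Int) : Decidable (Pre_find_similar_tickers_py ticker supported_tickers max_suggestions) := by unfold Pre_find_similar_tickers_py; infer_instance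

def pvWitness_find_similar_tickers_py : String × List String × Int := ("ap", ["AAPL", "MSFT", "aapl"], 2)

def Spec_find_similar_tickers_py (ticker : String) (supported_tickers : List String) (max_suggestions : Int) (out : List String) : Prop := out = find_similar_tickers_py_alt ticker supported_tickers max_suggestions
instance (ticker : String) (supported_tickers : List String) (max_suggestions : Int) (out : List String) : Decidable (Spec_find_similar_tickers_py ticker supported_tickers max_suggestions out) := by unfold Spec_find_similar_tickers_py; infer_instance

-- ===== CLAIM (what is proved, stated in full; the proofs are below) =====
def Claim_equal_find_similar_tickers_py : Prop := ∀ (ticker : String) (supported_tickers : List String) (max_suggestions : Int), Dom_find_similar_tickers_py ticker supported_tickers max_suggestions → Pre_find_similar_tickers_py ticker supported_tickers max_suggestions → Spec_find_similar_tickers_py ticker supported_tickers max_suggestions (find_similar_tickers_py ticker supported_tickers max_suggestions)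

-- ===== LEMMAS AND PROOFS =====

-- A's first pass is a filter.
theorem pv_phase1 {α : Type} (p : α → Bool) (l acc : List α) :
    l.foldl (fun acc s => if p s then acc ++ [s] else acc) acc = acc ++ l.filter p := by
  induction l generalizing acc with
  | nil => simp
  | cons s l ih =>
    simp only [List.foldl_cons, List.filter_cons]
    by_cases h : p s
    · rw [if_pos h, if_pos h, ih, List.append_assoc, List.singleton_append]
    · rw [if_neg h, if_neg h, ih]

-- B's single pass computes the pair (prefix filter, contains-only dedup fold).
theorem pv_phaseB (p q : String → Bool) (l : List String) (P C : List String) :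
    l.foldl
      (fun (pc : List String × List String) s =>
        if p s then (pc.1 ++ [s], pc.2)
        else if q s && !(pc.2.contains s) then (pc.1, pc.2 ++ [s])
        else pc) (P, C)
    = (P ++ l.filter p,
       l.foldl (fun c s => if !(p s) && q s && !(c.contains s) then c ++ [s] else c) C) := by
  induction l generalizing P C with
  | nil => simp
  | cons s l ih =>
    simp only [List.foldl_cons, List.filter_cons]
    by_cases h1 : p s
    · rw [if_pos h1, if_pos h1, ih, List.append_assoc, List.singleton_append, h1]
      simp only [Bool.not_true, Bool.false_and, Bool.false_eq_true, if_neg (by simp : ¬ False)]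
    · have hf : p s = false := by simpa using h1
      rw [if_neg h1, hf]
      simp only [Bool.not_false, Bool.true_and]
      by_cases h2 : (q s && !(C.contains s)) = true
      · rw [if_pos h2, if_pos h2, ih, if_neg (by simp : ¬ (false = true))]
      · rw [if_neg h2, if_neg h2, ih, if_neg (by simp : ¬ (false = true))]

-- A's second pass starting from P ++ C equals P ++ (the contains-only fold on C), provided every
-- p-matching element of l is already in P, all of P matches p, and nothing in C matches p
-- (p-matching elements are skipped by the membership guard; non-matching ones never meet P).
theorem pv_phase2 (p q : String → Bool) (l : List String) (P C : List String)
    (hP : ∀ s ∈ l, p s = true → s ∈ P)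
    (hPall : ∀ s ∈ P, p s = true)
    (hC : ∀ s ∈ C, p s = false) :
    l.foldl (fun acc s => if q s && !(acc.contains s) then acc ++ [s] else acc) (P ++ C)
    = P ++ l.foldl (fun c s => if !(p s) && q s && !(c.contains s) then c ++ [s] else c) C := by
  induction l generalizing C with
  | nil => rfl
  | cons s l ih =>
    simp only [List.foldl_cons]
    by_cases h1 : p s
    · have hsP : s ∈ P := hP s List.mem_cons_self h1
      have hmem : ((P ++ C).contains s) = true := by
        simp only [List.contains_eq_mem, List.mem_append]
        exact decide_eq_true (Or.inl hsP)
      rw [hmem, h1]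
      simp only [Bool.not_true, Bool.and_false, Bool.false_and, Bool.false_eq_true,
        if_neg (by simp : ¬ False)]
      exact ih C (fun x hx => hP x (List.mem_cons_of_mem _ hx)) hC
    · have hf : p s = false := by simpa using h1
      have hsP : s ∉ P := fun hs => h1 (hPall s hs)
      have hmem : ((P ++ C).contains s) = (C.contains s) := by
        simp only [List.contains_eq_mem, List.mem_append]
        by_cases hc : s ∈ C <;> simp [hc, hsP]
      rw [hmem, hf]
      simp only [Bool.not_false, Bool.true_and]
      by_cases h2 : (q s && !(C.contains s)) = true
      · rw [if_pos h2, if_pos h2, List.append_assoc]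
        exact ih (C ++ [s]) (fun x hx => hP x (List.mem_cons_of_mem _ hx))
          (by intro x hx
              rcases List.mem_append.mp hx with hx | hx
              · exact hC x hx
              · rw [List.mem_singleton.mp hx]; exact hf)
      · rw [if_neg h2, if_neg h2]
        exact ih C (fun x hx => hP x (List.mem_cons_of_mem _ hx)) hC

theorem pv_main (ticker : String) (supported : List String) (m : Int) (hm : 0 ≤ m) :
    find_similar_tickers_py ticker supported m = find_similar_tickers_py_alt ticker supported m := by
  unfold find_similar_tickers_py find_similar_tickers_py_alt
  show PySem.List.slice _ none (some m) = PySem.List.slice _ none (some m)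
  set tl := PySem.Str.lower ticker with htl
  set p : String → Bool := fun s => PySem.Str.startswith (PySem.Str.lower s) tl with hp
  set q : String → Bool := fun s => PySem.Str.isIn tl (PySem.Str.lower s) with hq
  rw [show (supported.foldl
      (fun (pc : List String × List String) s =>
        let sl := PySem.Str.lower s
        if PySem.Str.startswith sl tl then (pc.1 ++ [s], pc.2)
        else if PySem.Str.isIn tl sl && !(pc.2.contains s) then (pc.1, pc.2 ++ [s])
        else pc) ([], []))
    = (([] : List String) ++ supported.filter p,
       supported.foldl (fun c s => if !(p s) && q s && !(c.contains s) then c ++ [s] else c) []) from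
    pv_phaseB p q supported [] []]
  rw [show (supported.foldl
      (fun acc s => if PySem.Str.startswith (PySem.Str.lower s) tl then acc ++ [s] else acc) ([] : List String))
    = ([] : List String) ++ supported.filter p from pv_phase1 p supported []]
  simp only [List.nil_append]
  set P := supported.filter p with hP
  set C := supported.foldl (fun c s => if !(p s) && q s && !(c.contains s) then c ++ [s] else c) [] with hC
  by_cases hgate : ((P.length : Int) < m)
  · rw [if_pos hgate]
    rw [show (supported.foldl
        (fun acc s => if PySem.Str.isIn tl (PySem.Str.lower s) && !(acc.contains s) then acc ++ [s] else acc) P)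
      = supported.foldl (fun acc s => if q s && !(acc.contains s) then acc ++ [s] else acc) (P ++ []) from by
        rw [List.append_nil]]
    rw [pv_phase2 p q supported P []
      (fun s hs hps => List.mem_filter.mpr ⟨hs, hps⟩)
      (fun s hs => (List.mem_filter.mp hs).2)
      (fun s hs => by simp at hs)]
  · rw [if_neg hgate]
    -- gate closed: m ≤ |P|, so the truncation never reaches the contains-only bucket.
    have hle : m.toNat ≤ P.length := by omega
    rw [PySem.List.slice_to P hm, PySem.List.slice_to (P ++ C) hm, List.take_append_of_le_length hle]

-- ===== VERDICT (by name: the statement is the Claim_ definition above) =====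
theorem find_similar_tickers_py_spec : Claim_equal_find_similar_tickers_py := by
  intro ticker supported_tickers max_suggestions _hDom hPre
  unfold Spec_find_similar_tickers_py
  exact pv_main ticker supported_tickers max_suggestions hPre
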